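-- pv_equiv track=rewrite | github.com/clreinki/GalaxyHarvester | dbShared.py | dbInsertSafe
-- ===== SOURCE A (Python) =====
-- def dbInsertSafe(insertStr):
-- 	newStr = ""
-- 	if (insertStr != None):
-- 		for i in range(len(insertStr)):
-- 			if (insertStr[i] == "'"):
-- 				newStr = newStr + "'"
-- 			newStr = newStr + insertStr[i]
-- 	return newStr
-- ===== SOURCE B (Python) =====
-- def dbInsertSafe(insertStr):
-- 	if insertStr is None:
-- 		return ""
-- 	return insertStr.replace("'", "''")
-- ===== Notes on version B (the rewrite author's own statement) =====
-- stated objective: idiomatic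
-- what changed: Replaces the index loop with repeated char-by-char string concatenation by a single str.replace call that doubles every single quote (keeping the None guard).
import Mathlib
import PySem

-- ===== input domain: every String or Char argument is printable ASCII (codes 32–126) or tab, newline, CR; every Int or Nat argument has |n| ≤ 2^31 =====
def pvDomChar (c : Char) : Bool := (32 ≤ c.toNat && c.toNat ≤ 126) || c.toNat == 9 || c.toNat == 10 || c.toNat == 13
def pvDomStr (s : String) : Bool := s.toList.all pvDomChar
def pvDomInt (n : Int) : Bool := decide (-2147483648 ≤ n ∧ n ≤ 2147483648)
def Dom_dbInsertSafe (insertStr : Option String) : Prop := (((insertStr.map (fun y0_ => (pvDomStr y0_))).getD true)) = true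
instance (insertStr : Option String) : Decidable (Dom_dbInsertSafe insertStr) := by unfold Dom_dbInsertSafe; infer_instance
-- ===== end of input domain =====

-- B replaces A's index loop and char-by-char accumulation by one str.replace call (idiomatic).
-- ===== PORT A =====
-- for i in range(len(insertStr)): visit each character in order, appending to newStr
def dbInsertSafe (insertStr : Option String) : String :=
  match insertStr with
  | none => ""           -- insertStr == None: loop skipped, "" returned
  | some s =>
      String.ofList (s.toList.foldl
        (fun newStr c =>
          (if c = '\'' then newStr ++ ['\''] else newStr) ++ [c]) [])

-- ===== PORT B =====
def dbInsertSafe_alt (insertStr : Option String) : String :=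
  match insertStr with
  | none => ""
  | some s => PySem.Str.replace s "'" "''"

-- ===== PRECONDITION & SPEC =====
def Spec_dbInsertSafe (insertStr : Option String) (out : String) : Prop := out = dbInsertSafe_alt insertStr
instance (insertStr : Option String) (out : String) : Decidable (Spec_dbInsertSafe insertStr out) := by unfold Spec_dbInsertSafe; infer_instance

-- ===== CLAIM (what is proved, stated in full; the proofs are below) =====
def Claim_equal_dbInsertSafe : Prop := ∀ (insertStr : Option String), Dom_dbInsertSafe insertStr → Spec_dbInsertSafe insertStr (dbInsertSafe insertStr)

-- ===== LEMMAS AND PROOFS =====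

lemma pv_go_spec : ∀ (l acc : List Char) (fuel : Nat), l.length ≤ fuel →
    PySem.Chars.replace.go ['\''] ['\'', '\''] fuel l acc
      = acc.reverse ++ l.flatMap (fun c => if c = '\'' then ['\'', '\''] else [c]) := by
  intro l
  induction l with
  | nil =>
      intro acc fuel _
      cases fuel <;> simp [PySem.Chars.replace.go]
  | cons c t ih =>
      intro acc fuel hle
      cases fuel with
      | zero => simp at hle
      | succ fuel =>
          rw [PySem.Chars.replace.go]
          by_cases hc : c = '\''
          · subst hc
            have h := ih ('\'' :: '\'' :: acc) fuel (by simp at hle; omega)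
            simp [List.isPrefixOf, h]
          · have h := ih (c :: acc) fuel (by simp at hle; omega)
            simp [List.isPrefixOf, Ne.symm hc, hc, h]

lemma pv_foldl_spec : ∀ (l init : List Char),
    l.foldl (fun newStr c => (if c = '\'' then newStr ++ ['\''] else newStr) ++ [c]) init
      = init ++ l.flatMap (fun c => if c = '\'' then ['\'', '\''] else [c]) := by
  intro l
  induction l with
  | nil => simp
  | cons c t ih =>
      intro init
      by_cases hc : c = '\'' <;> simp [List.foldl, hc, ih] 

-- ===== VERDICT (by name: the statement is the Claim_ definition above) =====
theorem dbInsertSafe_spec : Claim_equal_dbInsertSafe := by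
  intro insertStr _
  unfold Spec_dbInsertSafe dbInsertSafe dbInsertSafe_alt
  cases insertStr with
  | none => rfl
  | some s =>
      have h : (PySem.Str.replace s "'" "''").toList
          = PySem.Chars.replace s.toList ['\''] ['\'', '\''] := by
        simp [PySem.Str.toList_replace]
      show String.ofList _ = PySem.Str.replace s "'" "''"
      rw [pv_foldl_spec]
      conv_rhs => rw [← (String.ofList_toList (s := PySem.Str.replace s "'" "''"))]
      rw [h, PySem.Chars.replace]
      rw [if_neg (by simp)]
      rw [pv_go_spec _ [] _ (le_refl _)]
      simp
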